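-- pv_equiv track=rewrite | github.com/we1yq/OR_sim_planner | k8s-extension-prototype/controller/planning/executor_preview.py | _builtin_gpu_operator_config_name
-- ===== SOURCE A (Python) =====
-- from typing import Any
--
-- def _builtin_gpu_operator_config_name(targets: list[dict[str, Any]]) -> str | None:
--     """Map simple A100-40GB full-GPU layouts to GPU Operator built-in configs."""
--     templates = {
--         str(target.get("targetTemplate", ""))
--         for target in targets
--         if target.get("targetTemplate") is not None
--     }
--     if len(templates) != 1:
--         return None
--     template = next(iter(templates))
--     return {
--         "": "or-sim-empty",
--         "1g+1g+1g+1g+1g+1g+1g": "all-1g.5gb",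
--         "2g+2g+2g": "all-2g.10gb",
--         "3g+3g": "all-3g.20gb",
--         "4g": "all-4g.20gb",
--         "7g": "all-7g.40gb",
--         "4g+3g": "or-sim-4-3",
--         "4g+2g+1g": "or-sim-4-2-1",
--         "4g+1g+1g+1g": "or-sim-4-1-1-1",
--         "3g+2g+1g": "or-sim-3-2-1",
--         "3g+1g+1g+1g": "or-sim-3-1-1-1",
--         "2g+2g+3g": "or-sim-2-2-3",
--         "3g+2g+1g+1g": "or-sim-3-2-1-1",
--         "3g+1g+1g+1g+1g": "or-sim-3-1-1-1-1",
--         "2g+2g+2g+1g": "or-sim-2-2-2-1",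
--         "2g+2g+1g+1g+1g": "or-sim-2-2-1-1-1",
--         "2g+1g+1g+1g+1g+1g": "or-sim-2-1-1-1-1-1",
--     }.get(template)
-- ===== SOURCE B (Python) =====
-- from typing import Any
--
-- _TABLE = {
--     "": "or-sim-empty",
--     "1g+1g+1g+1g+1g+1g+1g": "all-1g.5gb",
--     "2g+2g+2g": "all-2g.10gb",
--     "3g+3g": "all-3g.20gb",
--     "4g": "all-4g.20gb",
--     "7g": "all-7g.40gb",
--     "4g+3g": "or-sim-4-3",
--     "4g+2g+1g": "or-sim-4-2-1",
--     "4g+1g+1g+1g": "or-sim-4-1-1-1",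
--     "3g+2g+1g": "or-sim-3-2-1",
--     "3g+1g+1g+1g": "or-sim-3-1-1-1",
--     "2g+2g+3g": "or-sim-2-2-3",
--     "3g+2g+1g+1g": "or-sim-3-2-1-1",
--     "3g+1g+1g+1g+1g": "or-sim-3-1-1-1-1",
--     "2g+2g+2g+1g": "or-sim-2-2-2-1",
--     "2g+2g+1g+1g+1g": "or-sim-2-2-1-1-1",
--     "2g+1g+1g+1g+1g+1g": "or-sim-2-1-1-1-1-1",
-- }
--
--
-- def _builtin_gpu_operator_config_name(targets: list[dict[str, Any]]) -> str | None:
--     """Single-pass scan: remember the first template seen, bail out on any mismatch."""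
--     ref = None
--     for target in targets:
--         value = target.get("targetTemplate")
--         if value is None:
--             continue
--         value = str(value)
--         if ref is None:
--             ref = value
--         elif value != ref:
--             return None
--     if ref is None:
--         return None
--     return _TABLE.get(ref)
-- ===== Notes on version B (the rewrite author's own statement) =====
-- stated objective: alternative
-- what changed: Replaced the set-comprehension plus len(set)==1 check with a single-pass scan that remembers the first non-None template and returns None immediately on the first mismatch, looking up the table only after a clean pass.
import Mathlib
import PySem

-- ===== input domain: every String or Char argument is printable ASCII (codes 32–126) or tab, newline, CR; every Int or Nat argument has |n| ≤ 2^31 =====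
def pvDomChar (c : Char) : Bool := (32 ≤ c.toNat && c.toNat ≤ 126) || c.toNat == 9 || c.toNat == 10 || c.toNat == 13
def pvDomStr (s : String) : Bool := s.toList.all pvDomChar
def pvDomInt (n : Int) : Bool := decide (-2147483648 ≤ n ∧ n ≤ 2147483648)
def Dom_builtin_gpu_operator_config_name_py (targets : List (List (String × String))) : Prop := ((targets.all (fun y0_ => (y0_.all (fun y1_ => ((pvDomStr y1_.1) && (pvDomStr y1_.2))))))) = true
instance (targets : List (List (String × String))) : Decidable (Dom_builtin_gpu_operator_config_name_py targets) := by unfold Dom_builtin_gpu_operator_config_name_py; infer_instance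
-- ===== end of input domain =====

-- B replaces A's "build a set of templates, check it has exactly one element" with a
-- single-pass scan keeping one reference value and bailing out on the first mismatch (objective: alternative).


-- ===== PORT A =====
-- the literal dict both sources carry (A inline, Source B as _TABLE)
def pvTableA : List (String × String) :=
  [("", "or-sim-empty"),
   ("1g+1g+1g+1g+1g+1g+1g", "all-1g.5gb"),
   ("2g+2g+2g", "all-2g.10gb"),
   ("3g+3g", "all-3g.20gb"),
   ("4g", "all-4g.20gb"),
   ("7g", "all-7g.40gb"),
   ("4g+3g", "or-sim-4-3"),
   ("4g+2g+1g", "or-sim-4-2-1"),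
   ("4g+1g+1g+1g", "or-sim-4-1-1-1"),
   ("3g+2g+1g", "or-sim-3-2-1"),
   ("3g+1g+1g+1g", "or-sim-3-1-1-1"),
   ("2g+2g+3g", "or-sim-2-2-3"),
   ("3g+2g+1g+1g", "or-sim-3-2-1-1"),
   ("3g+1g+1g+1g+1g", "or-sim-3-1-1-1-1"),
   ("2g+2g+2g+1g", "or-sim-2-2-2-1"),
   ("2g+2g+1g+1g+1g", "or-sim-2-2-1-1-1"),
   ("2g+1g+1g+1g+1g+1g", "or-sim-2-1-1-1-1-1")]

-- set comprehension over targets (str(v) = v on string values), then len-1 check and dict lookup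
def builtin_gpu_operator_config_name_py (targets : List (List (String × String))) : Option String :=
  let templates : PySem.Set String :=
    PySem.Set.ofList (targets.filterMap (fun target => (PySem.Dict.mk target).get? "targetTemplate"))
  if templates.length ≠ 1 then none
  else
    match templates with
    | template :: _ => (PySem.Dict.mk pvTableA).get? template   -- next(iter(templates)); .get
    | [] => none                                               -- unreachable: length = 1

-- ===== PORT B =====

-- the for-loop of Source B: state `ref`, early `return None` on a mismatch, then the final lookup
def pvScanB (ref : Option String) : List (List (String × String)) → Option String
  | [] =>
    match ref with
    | none => none
    | some r => (PySem.Dict.mk pvTableA).get? r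
  | target :: rest =>
    match (PySem.Dict.mk target).get? "targetTemplate" with
    | none => pvScanB ref rest
    | some value =>
      match ref with
      | none => pvScanB (some value) rest
      | some r => if value ≠ r then none else pvScanB ref rest

def builtin_gpu_operator_config_name_py_alt (targets : List (List (String × String))) : Option String :=
  pvScanB none targets

-- ===== PRECONDITION & SPEC =====
def Spec_builtin_gpu_operator_config_name_py (targets : List (List (String × String))) (out : Option String) : Prop := out = builtin_gpu_operator_config_name_py_alt targets
instance (targets : List (List (String × String))) (out : Option String) : Decidable (Spec_builtin_gpu_operator_config_name_py targets out) := by unfold Spec_builtin_gpu_operator_config_name_py; infer_instance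

-- ===== CLAIM (what is proved, stated in full; the proofs are below) =====
def Claim_equal_builtin_gpu_operator_config_name_py : Prop := ∀ (targets : List (List (String × String))), Dom_builtin_gpu_operator_config_name_py targets → Spec_builtin_gpu_operator_config_name_py targets (builtin_gpu_operator_config_name_py targets)

-- ===== LEMMAS AND PROOFS =====

-- the list of template values both programs act on
def pvVals (targets : List (List (String × String))) : List String :=
  targets.filterMap (fun target => (PySem.Dict.mk target).get? "targetTemplate")

theorem pvVals_cons (t : List (String × String)) (ts : List (List (String × String))) :
    pvVals (t :: ts) =
      match (PySem.Dict.mk t).get? "targetTemplate" with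
      | none => pvVals ts
      | some v => v :: pvVals ts := by
  simp [pvVals, List.filterMap_cons]
  cases (PySem.Dict.mk t).get? "targetTemplate" <;> simp

-- B with reference r returns the lookup of r iff every later value equals r
theorem pvScanB_some (r : String) (ts : List (List (String × String))) :
    pvScanB (some r) ts =
      if (pvVals ts).all (· == r) then (PySem.Dict.mk pvTableA).get? r else none := by
  induction ts with
  | nil => simp [pvScanB, pvVals]
  | cons t ts ih =>
    rw [pvScanB]
    rw [pvVals_cons]
    cases h : (PySem.Dict.mk t).get? "targetTemplate" with
    | none => simpa using ih
    | some v =>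
      by_cases hv : v = r
      · subst hv; simpa using ih
      · simp [hv, List.all_cons]

theorem pvSet_ofList_all_eq (v : String) (l : List String) (h : l.all (· == v)) :
    PySem.Set.ofList (v :: l) = [v] := by
  have step : ∀ (l' : List String), l'.all (· == v) → List.foldl PySem.Set.add [v] l' = [v] := by
    intro l' hl'
    induction l' with
    | nil => rfl
    | cons x xs ih =>
      simp only [List.all_cons, Bool.and_eq_true, beq_iff_eq] at hl'
      obtain ⟨hx, hxs⟩ := hl'
      subst hx
      simpa [PySem.Set.add, PySem.Set.contains] using ih hxs
  have : PySem.Set.ofList (v :: l) = List.foldl PySem.Set.add [v] l := by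
    rw [PySem.Set.ofList_eq_foldl]
    simp [List.foldl_cons, PySem.Set.add, PySem.Set.contains]
  rw [this]
  exact step l h

theorem pvSet_ofList_len_ne_one (v : String) (l : List String) (h : ¬ l.all (· == v)) :
    (PySem.Set.ofList (v :: l)).length ≠ 1 := by
  intro hlen
  obtain ⟨x, hxmem, hxne⟩ : ∃ x ∈ l, ¬ (x == v) = true := by
    simpa [List.all_eq_true] using h
  obtain ⟨a, ha⟩ : ∃ a, PySem.Set.ofList (v :: l) = [a] := by
    cases hs : PySem.Set.ofList (v :: l) with
    | nil => rw [hs] at hlen; simp at hlen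
    | cons a rest =>
      rw [hs] at hlen
      simp at hlen
      subst hlen
      exact ⟨a, rfl⟩
  have hv : v ∈ PySem.Set.ofList (v :: l) := by
    rw [PySem.Set.mem_ofList]; simp
  have hx : x ∈ PySem.Set.ofList (v :: l) := by
    rw [PySem.Set.mem_ofList]; simp [hxmem]
  rw [ha] at hv hx
  simp at hv hx
  exact hxne (by simp [hx, hv])

-- ===== VERDICT (by name: the statement is the Claim_ definition above) =====
theorem builtin_gpu_operator_config_name_py_spec : Claim_equal_builtin_gpu_operator_config_name_py := by
  intro targets _
  show builtin_gpu_operator_config_name_py targets = builtin_gpu_operator_config_name_py_alt targets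
  unfold builtin_gpu_operator_config_name_py builtin_gpu_operator_config_name_py_alt
  have hvals : targets.filterMap (fun target => (PySem.Dict.mk target).get? "targetTemplate") = pvVals targets := rfl
  rw [hvals]
  have hscan : ∀ ts, pvScanB none ts =
      match pvVals ts with
      | [] => none
      | v :: rest => if rest.all (· == v) then (PySem.Dict.mk pvTableA).get? v else none := by
    intro ts
    induction ts with
    | nil => simp [pvScanB, pvVals]
    | cons t ts ih =>
      rw [pvScanB, pvVals_cons]
      cases h : (PySem.Dict.mk t).get? "targetTemplate" with
      | none => simpa using ih
      | some v => simpa using pvScanB_some v ts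
  rw [hscan]
  cases hv : pvVals targets with
  | nil => simp [PySem.Set.ofList, PySem.Set.empty]
  | cons v rest =>
    by_cases hall : rest.all (· == v)
    · rw [pvSet_ofList_all_eq v rest hall]
      simp [hall]
    · have hne := pvSet_ofList_len_ne_one v rest hall
      simp [hne, hall]
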